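-- pv_equiv track=rewrite | github.com/adhithyan15/coding-adventures | code/packages/python/brotli/src/coding_adventures_brotli/__init__.py | _find_icc_code
-- ===== SOURCE A (Python) =====
-- _ICC_TABLE: list[tuple[int, int, int, int]] = [
--     # (insert_base, insert_extra, copy_base, copy_extra)
--     (0,  0,   4, 0),  # 0
--     (0,  0,   5, 0),  # 1
--     (0,  0,   6, 0),  # 2
--     (0,  0,   8, 1),  # 3
--     (0,  0,  10, 1),  # 4
--     (0,  0,  14, 2),  # 5
--     (0,  0,  18, 2),  # 6
--     (0,  0,  26, 3),  # 7
--     (0,  0,  34, 3),  # 8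
--     (0,  0,  50, 4),  # 9
--     (0,  0,  66, 4),  # 10
--     (0,  0,  98, 5),  # 11
--     (0,  0, 130, 5),  # 12
--     (0,  0, 194, 6),  # 13
--     (0,  0, 258, 7),  # 14
--     (0,  0, 514, 8),  # 15
--     (1,  0,   4, 0),  # 16
--     (1,  0,   5, 0),  # 17
--     (1,  0,   6, 0),  # 18
--     (1,  0,   8, 1),  # 19
--     (1,  0,  10, 1),  # 20
--     (1,  0,  14, 2),  # 21
--     (1,  0,  18, 2),  # 22
--     (1,  0,  26, 3),  # 23
--     (2,  0,   4, 0),  # 24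
--     (2,  0,   5, 0),  # 25
--     (2,  0,   6, 0),  # 26
--     (2,  0,   8, 1),  # 27
--     (2,  0,  10, 1),  # 28
--     (2,  0,  14, 2),  # 29
--     (2,  0,  18, 2),  # 30
--     (2,  0,  26, 3),  # 31
--     (3,  1,   4, 0),  # 32
--     (3,  1,   5, 0),  # 33
--     (3,  1,   6, 0),  # 34
--     (3,  1,   8, 1),  # 35
--     (3,  1,  10, 1),  # 36
--     (3,  1,  14, 2),  # 37
--     (3,  1,  18, 2),  # 38
--     (3,  1,  26, 3),  # 39
--     (5,  2,   4, 0),  # 40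
--     (5,  2,   5, 0),  # 41
--     (5,  2,   6, 0),  # 42
--     (5,  2,   8, 1),  # 43
--     (5,  2,  10, 1),  # 44
--     (5,  2,  14, 2),  # 45
--     (5,  2,  18, 2),  # 46
--     (5,  2,  26, 3),  # 47
--     (9,  3,   4, 0),  # 48
--     (9,  3,   5, 0),  # 49
--     (9,  3,   6, 0),  # 50
--     (9,  3,   8, 1),  # 51
--     (9,  3,  10, 1),  # 52
--     (9,  3,  14, 2),  # 53
--     (9,  3,  18, 2),  # 54
--     (9,  3,  26, 3),  # 55
--     (17, 4,   4, 0),  # 56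
--     (17, 4,   5, 0),  # 57
--     (17, 4,   6, 0),  # 58
--     (17, 4,   8, 1),  # 59
--     (17, 4,  10, 1),  # 60
--     (17, 4,  14, 2),  # 61
--     (17, 4,  18, 2),  # 62
--     (0,  0,   0, 0),  # 63 sentinel
-- ]
--
-- _ICC_COPY_BASE:    list[int] = [r[2] for r in _ICC_TABLE]
--
-- _ICC_COPY_EXTRA:   list[int] = [r[3] for r in _ICC_TABLE]
--
-- def _find_icc_code(insert_length: int, copy_length: int) -> int:
--     """Find the ICC code whose ranges contain both insert_length and copy_length.
--
--     Scans all 63 non-sentinel codes and returns the first match.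
--     The ICC table has gaps in copy-length coverage (e.g., copy=7 is not
--     representable). The caller must ensure copy_length is encodable via
--     _find_best_icc_copy() before calling this function.
--
--     Examples:
--         _find_icc_code(0, 4)  → 0   (insert=0, copy=4)
--         _find_icc_code(1, 5)  → 17  (insert=1, copy=5)
--         _find_icc_code(2, 4)  → 24  (insert=2, copy=4)
--     """
--     for code in range(63):
--         ib, ie, cb, ce = _ICC_TABLE[code]
--         in_range = ib <= insert_length <= ib + (1 << ie) - 1
--         co_range = cb <= copy_length <= cb + (1 << ce) - 1
--         if in_range and co_range:
--             return code
--
--     # Fallback: copy-only code (insert=0) for this copy_length.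
--     for code in range(16):
--         cb, ce = _ICC_COPY_BASE[code], _ICC_COPY_EXTRA[code]
--         if cb <= copy_length <= cb + (1 << ce) - 1:
--             return code
--
--     return 0
-- ===== SOURCE B (Python) =====
-- # B: decomposed lookup — find the insert group and the copy slot independently,
-- # then combine arithmetically, instead of scanning all 63 (insert,copy) pairs.
--
-- _INSERT_RANGES = [(0, 0), (1, 0), (2, 0), (3, 1), (5, 2), (9, 3), (17, 4)]
-- _GROUP_OFFSET = [0, 16, 24, 32, 40, 48, 56]
-- _GROUP_COPY_COUNT = [16, 8, 8, 8, 8, 8, 7]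
-- _COPY_RANGES = [
--     (4, 0), (5, 0), (6, 0), (8, 1), (10, 1), (14, 2), (18, 2), (26, 3),
--     (34, 3), (50, 4), (66, 4), (98, 5), (130, 5), (194, 6), (258, 7), (514, 8),
-- ]
--
--
-- def _find_icc_code(insert_length: int, copy_length: int) -> int:
--     gi = next((i for i, (b, e) in enumerate(_INSERT_RANGES)
--                if b <= insert_length <= b + (1 << e) - 1), None)
--     ci = next((i for i, (b, e) in enumerate(_COPY_RANGES)
--                if b <= copy_length <= b + (1 << e) - 1), None)
--     if ci is None:
--         return 0
--     if gi is not None and ci < _GROUP_COPY_COUNT[gi]: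
--         return _GROUP_OFFSET[gi] + ci
--     return ci
-- ===== Notes on version B (the rewrite author's own statement) =====
-- stated objective: alternative
-- what changed: A scans a 63-row table of (insert,copy) range pairs plus a 16-row fallback scan; B performs two independent range lookups (7 insert groups, 16 copy slots) and combines the two indices arithmetically via per-group offsets and copy counts.
import Mathlib
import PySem

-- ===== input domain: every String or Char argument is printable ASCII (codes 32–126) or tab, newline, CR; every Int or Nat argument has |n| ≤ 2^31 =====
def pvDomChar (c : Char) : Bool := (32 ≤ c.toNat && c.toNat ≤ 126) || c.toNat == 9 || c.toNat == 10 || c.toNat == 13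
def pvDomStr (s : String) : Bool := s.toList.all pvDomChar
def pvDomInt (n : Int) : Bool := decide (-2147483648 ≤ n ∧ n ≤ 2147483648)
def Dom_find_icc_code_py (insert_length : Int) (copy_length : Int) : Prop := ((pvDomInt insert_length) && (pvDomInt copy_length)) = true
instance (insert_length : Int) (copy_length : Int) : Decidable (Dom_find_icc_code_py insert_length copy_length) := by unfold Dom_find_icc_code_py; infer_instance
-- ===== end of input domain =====

-- B replaces A's single 63-row (insert,copy) scan by two independent range lookups
-- (7 insert groups, 16 copy slots) combined arithmetically (objective: alternative).

-- ===== PORT A =====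
-- the 63 non-sentinel rows of _ICC_TABLE: (insert_base, insert_extra, copy_base, copy_extra)
def pvIccTable : List (Int × Nat × Int × Nat) := [
  (0, 0, 4, 0),
  (0, 0, 5, 0),
  (0, 0, 6, 0),
  (0, 0, 8, 1),
  (0, 0, 10, 1),
  (0, 0, 14, 2),
  (0, 0, 18, 2),
  (0, 0, 26, 3),
  (0, 0, 34, 3),
  (0, 0, 50, 4),
  (0, 0, 66, 4),
  (0, 0, 98, 5),
  (0, 0, 130, 5),
  (0, 0, 194, 6),
  (0, 0, 258, 7),
  (0, 0, 514, 8),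
  (1, 0, 4, 0),
  (1, 0, 5, 0),
  (1, 0, 6, 0),
  (1, 0, 8, 1),
  (1, 0, 10, 1),
  (1, 0, 14, 2),
  (1, 0, 18, 2),
  (1, 0, 26, 3),
  (2, 0, 4, 0),
  (2, 0, 5, 0),
  (2, 0, 6, 0),
  (2, 0, 8, 1),
  (2, 0, 10, 1),
  (2, 0, 14, 2),
  (2, 0, 18, 2),
  (2, 0, 26, 3),
  (3, 1, 4, 0),
  (3, 1, 5, 0),
  (3, 1, 6, 0),
  (3, 1, 8, 1),
  (3, 1, 10, 1),
  (3, 1, 14, 2),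
  (3, 1, 18, 2),
  (3, 1, 26, 3),
  (5, 2, 4, 0),
  (5, 2, 5, 0),
  (5, 2, 6, 0),
  (5, 2, 8, 1),
  (5, 2, 10, 1),
  (5, 2, 14, 2),
  (5, 2, 18, 2),
  (5, 2, 26, 3),
  (9, 3, 4, 0),
  (9, 3, 5, 0),
  (9, 3, 6, 0),
  (9, 3, 8, 1),
  (9, 3, 10, 1),
  (9, 3, 14, 2),
  (9, 3, 18, 2),
  (9, 3, 26, 3),
  (17, 4, 4, 0),
  (17, 4, 5, 0),
  (17, 4, 6, 0),
  (17, 4, 8, 1),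
  (17, 4, 10, 1),
  (17, 4, 14, 2),
  (17, 4, 18, 2)]

-- 'for code in range(63): …; if in_range and co_range: return code' — first-match scan
def pvIccScan (il cl : Int) : List (Int × Nat × Int × Nat) → Nat → Option Nat
  | [], _ => none
  | (ib, ie, cb, ce) :: rest, k =>
    if (ib ≤ il ∧ il ≤ ib + 2 ^ ie - 1) ∧ (cb ≤ cl ∧ cl ≤ cb + 2 ^ ce - 1) then some k
    else pvIccScan il cl rest (k + 1)

-- (_ICC_COPY_BASE[code], _ICC_COPY_EXTRA[code]) for the 16 codes of the fallback loop
def pvIccCopy16 : List (Int × Nat) :=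
  [(4,0),(5,0),(6,0),(8,1),(10,1),(14,2),(18,2),(26,3),(34,3),(50,4),(66,4),(98,5),(130,5),(194,6),(258,7),(514,8)]

-- 'for code in range(16): …' fallback scan
def pvCopyScan (cl : Int) : List (Int × Nat) → Nat → Option Nat
  | [], _ => none
  | (cb, ce) :: rest, k =>
    if cb ≤ cl ∧ cl ≤ cb + 2 ^ ce - 1 then some k
    else pvCopyScan cl rest (k + 1)

def find_icc_code_py (insert_length : Int) (copy_length : Int) : Int :=
  match pvIccScan insert_length copy_length pvIccTable 0 with
  | some code => (code : Int)
  | none =>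
    match pvCopyScan copy_length pvIccCopy16 0 with
    | some code => (code : Int)
    | none => 0

-- ===== PORT B =====
def pvInsertRanges : List (Int × Nat) := [(0,0),(1,0),(2,0),(3,1),(5,2),(9,3),(17,4)]
def pvGroupOffset : List Int := [0, 16, 24, 32, 40, 48, 56]
def pvGroupCopyCount : List Nat := [16, 8, 8, 8, 8, 8, 7]
def pvCopyRanges : List (Int × Nat) :=
  [(4,0),(5,0),(6,0),(8,1),(10,1),(14,2),(18,2),(26,3),(34,3),(50,4),(66,4),(98,5),(130,5),(194,6),(258,7),(514,8)]

-- 'next((i for i, (b, e) in enumerate(rs) if b <= x <= b + (1 << e) - 1), None)'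
def pvFindRange (x : Int) : List (Int × Nat) → Nat → Option Nat
  | [], _ => none
  | (b, e) :: rest, k =>
    if b ≤ x ∧ x ≤ b + 2 ^ e - 1 then some k
    else pvFindRange x rest (k + 1)

def find_icc_code_py_alt (insert_length : Int) (copy_length : Int) : Int :=
  let gi := pvFindRange insert_length pvInsertRanges 0
  let ci := pvFindRange copy_length pvCopyRanges 0
  match ci with
  | none => 0
  | some c =>
    match gi with
    | some g =>
      if c < pvGroupCopyCount.getD g 0 then pvGroupOffset.getD g 0 + (c : Int)
      else (c : Int)
    | none => (c : Int)

-- ===== PRECONDITION & SPEC =====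
def Spec_find_icc_code_py (insert_length : Int) (copy_length : Int) (out : Int) : Prop := out = find_icc_code_py_alt insert_length copy_length
instance (insert_length : Int) (copy_length : Int) (out : Int) : Decidable (Spec_find_icc_code_py insert_length copy_length out) := by unfold Spec_find_icc_code_py; infer_instance

-- ===== CLAIM (what is proved, stated in full; the proofs are below) =====
def Claim_equal_find_icc_code_py : Prop := ∀ (insert_length : Int) (copy_length : Int), Dom_find_icc_code_py insert_length copy_length → Spec_find_icc_code_py insert_length copy_length (find_icc_code_py insert_length copy_length)

-- ===== LEMMAS AND PROOFS =====
def pvBlock (ib : Int) (ie : Nat) (cs : List (Int × Nat)) : List (Int × Nat × Int × Nat) :=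
  cs.map fun p => (ib, ie, p.1, p.2)

theorem pvFindRange_shift (x : Int) (cs : List (Int × Nat)) (k : Nat) :
    pvFindRange x cs k = (pvFindRange x cs 0).map (fun c => k + c) := by
  induction cs generalizing k with
  | nil => simp [pvFindRange]
  | cons p rest ih =>
    obtain ⟨b, e⟩ := p
    simp only [pvFindRange]
    split_ifs with h
    · simp
    · rw [ih (k+1), ih 1]
      cases pvFindRange x rest 0 <;> simp <;> omega

theorem pvFindRange_take (x : Int) (cs : List (Int × Nat)) (n k : Nat) :
    pvFindRange x (cs.take n) k =
      match pvFindRange x cs 0 with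
      | some c => if c < n then some (k + c) else none
      | none => none := by
  induction cs generalizing n k with
  | nil => simp [pvFindRange]
  | cons p rest ih =>
    obtain ⟨b, e⟩ := p
    cases n with
    | zero =>
      cases h : pvFindRange x ((b, e) :: rest) 0 <;> simp [pvFindRange]
    | succ m =>
      simp only [List.take_succ_cons, pvFindRange]
      split_ifs with h
      · simp
      · rw [ih m (k+1), pvFindRange_shift x rest 1]
        cases pvFindRange x rest 0 with
        | none => simp
        | some c =>
          simp only [Option.map_some]
          split_ifs <;> first | (exfalso; omega) | (simp only [Option.some.injEq]; omega) | rfl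


theorem pvBlock_cons (ib : Int) (ie : Nat) (cb : Int) (ce : Nat) (rest : List (Int × Nat)) :
    pvBlock ib ie ((cb, ce) :: rest) = (ib, ie, cb, ce) :: pvBlock ib ie rest := rfl

theorem pvSkipBlock (il cl ib : Int) (ie : Nat) (cs : List (Int × Nat))
    (ys : List (Int × Nat × Int × Nat)) (k : Nat)
    (h : ¬(ib ≤ il ∧ il ≤ ib + 2 ^ ie - 1)) :
    pvIccScan il cl (pvBlock ib ie cs ++ ys) k = pvIccScan il cl ys (k + cs.length) := by
  induction cs generalizing k with
  | nil => simp [pvBlock]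
  | cons p rest ih =>
    obtain ⟨cb, ce⟩ := p
    rw [pvBlock_cons]
    simp only [List.cons_append, pvIccScan]
    rw [if_neg (fun hh => h hh.1), ih]
    congr 1
    simp
    omega

theorem pvFoundBlock (il cl ib : Int) (ie : Nat) (cs : List (Int × Nat))
    (ys : List (Int × Nat × Int × Nat)) (k c : Nat)
    (hins : ib ≤ il ∧ il ≤ ib + 2 ^ ie - 1)
    (hc : pvFindRange cl cs k = some c) :
    pvIccScan il cl (pvBlock ib ie cs ++ ys) k = some c := by
  induction cs generalizing k with
  | nil => simp [pvFindRange] at hc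
  | cons p rest ih =>
    obtain ⟨cb, ce⟩ := p
    rw [pvBlock_cons]
    simp only [List.cons_append, pvIccScan]
    simp only [pvFindRange] at hc
    by_cases hcc : cb ≤ cl ∧ cl ≤ cb + 2 ^ ce - 1
    · rw [if_pos ⟨hins, hcc⟩]; rw [if_pos hcc] at hc; exact hc
    · rw [if_neg (fun hh => hcc hh.2)]; rw [if_neg hcc] at hc; exact ih (k+1) hc

theorem pvNotFoundBlock (il cl ib : Int) (ie : Nat) (cs : List (Int × Nat))
    (ys : List (Int × Nat × Int × Nat)) (k : Nat)
    (hc : pvFindRange cl cs k = none) :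
    pvIccScan il cl (pvBlock ib ie cs ++ ys) k = pvIccScan il cl ys (k + cs.length) := by
  induction cs generalizing k with
  | nil => simp [pvBlock]
  | cons p rest ih =>
    obtain ⟨cb, ce⟩ := p
    rw [pvBlock_cons]
    simp only [List.cons_append, pvIccScan]
    simp only [pvFindRange] at hc
    by_cases hcc : cb ≤ cl ∧ cl ≤ cb + 2 ^ ce - 1
    · rw [if_pos hcc] at hc; exact absurd hc (by simp)
    · rw [if_neg hcc] at hc
      rw [if_neg (fun hh => hcc hh.2), ih (k+1) hc]
      congr 1
      simp
      omega


theorem pvSkipBlockNil (il cl ib : Int) (ie : Nat) (cs : List (Int × Nat)) (k : Nat)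
    (h : ¬(ib ≤ il ∧ il ≤ ib + 2 ^ ie - 1)) :
    pvIccScan il cl (pvBlock ib ie cs) k = none := by
  have h2 := pvSkipBlock il cl ib ie cs [] k h
  rw [List.append_nil] at h2
  exact h2.trans rfl

theorem pvNotFoundBlockNil (il cl ib : Int) (ie : Nat) (cs : List (Int × Nat)) (k : Nat)
    (hc : pvFindRange cl cs k = none) :
    pvIccScan il cl (pvBlock ib ie cs) k = none := by
  have h2 := pvNotFoundBlock il cl ib ie cs [] k hc
  rw [List.append_nil] at h2
  exact h2.trans rfl

theorem pvCopyScanEq (cl : Int) (cs : List (Int × Nat)) (k : Nat) :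
    pvCopyScan cl cs k = pvFindRange cl cs k := by
  induction cs generalizing k with
  | nil => rfl
  | cons p rest ih =>
    obtain ⟨cb, ce⟩ := p
    simp only [pvCopyScan, pvFindRange]
    split_ifs
    · rfl
    · exact ih (k + 1)

theorem pvCopyScanEq16 (cl : Int) :
    pvCopyScan cl pvIccCopy16 0 = pvFindRange cl pvCopyRanges 0 :=
  pvCopyScanEq cl pvIccCopy16 0

-- the 63-row table is seven insert-groups, each paired with a prefix of the copy ranges
theorem pvTableDecomp : pvIccTable =
    pvBlock 0 0 (pvCopyRanges.take 16) ++ (pvBlock 1 0 (pvCopyRanges.take 8) ++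
    (pvBlock 2 0 (pvCopyRanges.take 8) ++ (pvBlock 3 1 (pvCopyRanges.take 8) ++
    (pvBlock 5 2 (pvCopyRanges.take 8) ++ (pvBlock 9 3 (pvCopyRanges.take 8) ++
    (pvBlock 17 4 (pvCopyRanges.take 7) ++ [])))))) := rfl

set_option maxHeartbeats 1000000 in
theorem pv_main (il cl : Int) : find_icc_code_py il cl = find_icc_code_py_alt il cl := by
  by_cases h0 : (0:Int) ≤ il ∧ il ≤ 0
  ·
    have hgi : pvFindRange il pvInsertRanges 0 = some 0 := by
      simp only [pvInsertRanges, pvFindRange]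
      split_ifs <;> first | rfl | (exfalso; omega)
    have hcntval : pvGroupCopyCount.getD 0 0 = 16 := rfl
    have hoffval : pvGroupOffset.getD 0 0 = 0 := rfl
    rcases hci : pvFindRange cl pvCopyRanges 0 with _ | c
    · have hp : pvFindRange cl (pvCopyRanges.take 16) 0 = none := by
        rw [pvFindRange_take, hci]
      have hA : pvIccScan il cl pvIccTable 0 = none := by
        rw [pvTableDecomp]
        rw [pvNotFoundBlock il cl 0 0 _ _ _ hp]
        rw [show (pvCopyRanges.take 16).length = 16 from rfl]
        norm_num
        rw [pvSkipBlock il cl 1 0 _ _ _ (by omega)]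
        rw [show (pvCopyRanges.take 8).length = 8 from rfl]
        norm_num
        rw [pvSkipBlock il cl 2 0 _ _ _ (by omega)]
        rw [show (pvCopyRanges.take 8).length = 8 from rfl]
        norm_num
        rw [pvSkipBlock il cl 3 1 _ _ _ (by omega)]
        rw [show (pvCopyRanges.take 8).length = 8 from rfl]
        norm_num
        rw [pvSkipBlock il cl 5 2 _ _ _ (by omega)]
        rw [show (pvCopyRanges.take 8).length = 8 from rfl]
        norm_num
        rw [pvSkipBlock il cl 9 3 _ _ _ (by omega)]
        rw [show (pvCopyRanges.take 8).length = 8 from rfl]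
        norm_num
        exact pvSkipBlockNil il cl 17 4 _ _ (by omega)
      simp only [find_icc_code_py, find_icc_code_py_alt, hA, hci, pvCopyScanEq16]
    · by_cases hcnt : c < 16
      · have hp : pvFindRange cl (pvCopyRanges.take 16) 0 = some (0 + c) := by
          simp [pvFindRange_take, hci, hcnt]
        have hA : pvIccScan il cl pvIccTable 0 = some (0 + c) := by
          rw [pvTableDecomp]
          exact pvFoundBlock il cl 0 0 _ _ _ (0 + c) (by omega) hp
        simp only [find_icc_code_py, find_icc_code_py_alt, hA, hgi, hci]
        rw [hcntval, hoffval, if_pos hcnt]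
        push_cast
        omega
      · have hp : pvFindRange cl (pvCopyRanges.take 16) 0 = none := by
          simp [pvFindRange_take, hci, hcnt]
        have hA : pvIccScan il cl pvIccTable 0 = none := by
          rw [pvTableDecomp]
          rw [pvNotFoundBlock il cl 0 0 _ _ _ hp]
          rw [show (pvCopyRanges.take 16).length = 16 from rfl]
          norm_num
          rw [pvSkipBlock il cl 1 0 _ _ _ (by omega)]
          rw [show (pvCopyRanges.take 8).length = 8 from rfl]
          norm_num
          rw [pvSkipBlock il cl 2 0 _ _ _ (by omega)]
          rw [show (pvCopyRanges.take 8).length = 8 from rfl]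
          norm_num
          rw [pvSkipBlock il cl 3 1 _ _ _ (by omega)]
          rw [show (pvCopyRanges.take 8).length = 8 from rfl]
          norm_num
          rw [pvSkipBlock il cl 5 2 _ _ _ (by omega)]
          rw [show (pvCopyRanges.take 8).length = 8 from rfl]
          norm_num
          rw [pvSkipBlock il cl 9 3 _ _ _ (by omega)]
          rw [show (pvCopyRanges.take 8).length = 8 from rfl]
          norm_num
          exact pvSkipBlockNil il cl 17 4 _ _ (by omega)
        simp only [find_icc_code_py, find_icc_code_py_alt, hA, hgi, hci, pvCopyScanEq16]
        rw [hcntval, if_neg hcnt]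
  by_cases h1 : (1:Int) ≤ il ∧ il ≤ 1
  ·
    have hgi : pvFindRange il pvInsertRanges 0 = some 1 := by
      simp only [pvInsertRanges, pvFindRange]
      split_ifs <;> first | rfl | (exfalso; omega)
    have hcntval : pvGroupCopyCount.getD 1 0 = 8 := rfl
    have hoffval : pvGroupOffset.getD 1 0 = 16 := rfl
    rcases hci : pvFindRange cl pvCopyRanges 0 with _ | c
    · have hp : pvFindRange cl (pvCopyRanges.take 8) 16 = none := by
        rw [pvFindRange_take, hci]
      have hA : pvIccScan il cl pvIccTable 0 = none := by
        rw [pvTableDecomp]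
        rw [pvSkipBlock il cl 0 0 _ _ _ (by omega)]
        rw [show (pvCopyRanges.take 16).length = 16 from rfl]
        norm_num
        rw [pvNotFoundBlock il cl 1 0 _ _ _ hp]
        rw [show (pvCopyRanges.take 8).length = 8 from rfl]
        norm_num
        rw [pvSkipBlock il cl 2 0 _ _ _ (by omega)]
        rw [show (pvCopyRanges.take 8).length = 8 from rfl]
        norm_num
        rw [pvSkipBlock il cl 3 1 _ _ _ (by omega)]
        rw [show (pvCopyRanges.take 8).length = 8 from rfl]
        norm_num
        rw [pvSkipBlock il cl 5 2 _ _ _ (by omega)]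
        rw [show (pvCopyRanges.take 8).length = 8 from rfl]
        norm_num
        rw [pvSkipBlock il cl 9 3 _ _ _ (by omega)]
        rw [show (pvCopyRanges.take 8).length = 8 from rfl]
        norm_num
        exact pvSkipBlockNil il cl 17 4 _ _ (by omega)
      simp only [find_icc_code_py, find_icc_code_py_alt, hA, hci, pvCopyScanEq16]
    · by_cases hcnt : c < 8
      · have hp : pvFindRange cl (pvCopyRanges.take 8) 16 = some (16 + c) := by
          simp [pvFindRange_take, hci, hcnt]
        have hA : pvIccScan il cl pvIccTable 0 = some (16 + c) := by
          rw [pvTableDecomp]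
          rw [pvSkipBlock il cl 0 0 _ _ _ (by omega)]
          rw [show (pvCopyRanges.take 16).length = 16 from rfl]
          norm_num
          exact pvFoundBlock il cl 1 0 _ _ _ (16 + c) (by omega) hp
        simp only [find_icc_code_py, find_icc_code_py_alt, hA, hgi, hci]
        rw [hcntval, hoffval, if_pos hcnt]
        push_cast
        omega
      · have hp : pvFindRange cl (pvCopyRanges.take 8) 16 = none := by
          simp [pvFindRange_take, hci, hcnt]
        have hA : pvIccScan il cl pvIccTable 0 = none := by
          rw [pvTableDecomp]
          rw [pvSkipBlock il cl 0 0 _ _ _ (by omega)]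
          rw [show (pvCopyRanges.take 16).length = 16 from rfl]
          norm_num
          rw [pvNotFoundBlock il cl 1 0 _ _ _ hp]
          rw [show (pvCopyRanges.take 8).length = 8 from rfl]
          norm_num
          rw [pvSkipBlock il cl 2 0 _ _ _ (by omega)]
          rw [show (pvCopyRanges.take 8).length = 8 from rfl]
          norm_num
          rw [pvSkipBlock il cl 3 1 _ _ _ (by omega)]
          rw [show (pvCopyRanges.take 8).length = 8 from rfl]
          norm_num
          rw [pvSkipBlock il cl 5 2 _ _ _ (by omega)]
          rw [show (pvCopyRanges.take 8).length = 8 from rfl]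
          norm_num
          rw [pvSkipBlock il cl 9 3 _ _ _ (by omega)]
          rw [show (pvCopyRanges.take 8).length = 8 from rfl]
          norm_num
          exact pvSkipBlockNil il cl 17 4 _ _ (by omega)
        simp only [find_icc_code_py, find_icc_code_py_alt, hA, hgi, hci, pvCopyScanEq16]
        rw [hcntval, if_neg hcnt]
  by_cases h2 : (2:Int) ≤ il ∧ il ≤ 2
  ·
    have hgi : pvFindRange il pvInsertRanges 0 = some 2 := by
      simp only [pvInsertRanges, pvFindRange]
      split_ifs <;> first | rfl | (exfalso; omega)
    have hcntval : pvGroupCopyCount.getD 2 0 = 8 := rfl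
    have hoffval : pvGroupOffset.getD 2 0 = 24 := rfl
    rcases hci : pvFindRange cl pvCopyRanges 0 with _ | c
    · have hp : pvFindRange cl (pvCopyRanges.take 8) 24 = none := by
        rw [pvFindRange_take, hci]
      have hA : pvIccScan il cl pvIccTable 0 = none := by
        rw [pvTableDecomp]
        rw [pvSkipBlock il cl 0 0 _ _ _ (by omega)]
        rw [show (pvCopyRanges.take 16).length = 16 from rfl]
        norm_num
        rw [pvSkipBlock il cl 1 0 _ _ _ (by omega)]
        rw [show (pvCopyRanges.take 8).length = 8 from rfl]
        norm_num
        rw [pvNotFoundBlock il cl 2 0 _ _ _ hp]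
        rw [show (pvCopyRanges.take 8).length = 8 from rfl]
        norm_num
        rw [pvSkipBlock il cl 3 1 _ _ _ (by omega)]
        rw [show (pvCopyRanges.take 8).length = 8 from rfl]
        norm_num
        rw [pvSkipBlock il cl 5 2 _ _ _ (by omega)]
        rw [show (pvCopyRanges.take 8).length = 8 from rfl]
        norm_num
        rw [pvSkipBlock il cl 9 3 _ _ _ (by omega)]
        rw [show (pvCopyRanges.take 8).length = 8 from rfl]
        norm_num
        exact pvSkipBlockNil il cl 17 4 _ _ (by omega)
      simp only [find_icc_code_py, find_icc_code_py_alt, hA, hci, pvCopyScanEq16]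
    · by_cases hcnt : c < 8
      · have hp : pvFindRange cl (pvCopyRanges.take 8) 24 = some (24 + c) := by
          simp [pvFindRange_take, hci, hcnt]
        have hA : pvIccScan il cl pvIccTable 0 = some (24 + c) := by
          rw [pvTableDecomp]
          rw [pvSkipBlock il cl 0 0 _ _ _ (by omega)]
          rw [show (pvCopyRanges.take 16).length = 16 from rfl]
          norm_num
          rw [pvSkipBlock il cl 1 0 _ _ _ (by omega)]
          rw [show (pvCopyRanges.take 8).length = 8 from rfl]
          norm_num
          exact pvFoundBlock il cl 2 0 _ _ _ (24 + c) (by omega) hp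
        simp only [find_icc_code_py, find_icc_code_py_alt, hA, hgi, hci]
        rw [hcntval, hoffval, if_pos hcnt]
        push_cast
        omega
      · have hp : pvFindRange cl (pvCopyRanges.take 8) 24 = none := by
          simp [pvFindRange_take, hci, hcnt]
        have hA : pvIccScan il cl pvIccTable 0 = none := by
          rw [pvTableDecomp]
          rw [pvSkipBlock il cl 0 0 _ _ _ (by omega)]
          rw [show (pvCopyRanges.take 16).length = 16 from rfl]
          norm_num
          rw [pvSkipBlock il cl 1 0 _ _ _ (by omega)]
          rw [show (pvCopyRanges.take 8).length = 8 from rfl]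
          norm_num
          rw [pvNotFoundBlock il cl 2 0 _ _ _ hp]
          rw [show (pvCopyRanges.take 8).length = 8 from rfl]
          norm_num
          rw [pvSkipBlock il cl 3 1 _ _ _ (by omega)]
          rw [show (pvCopyRanges.take 8).length = 8 from rfl]
          norm_num
          rw [pvSkipBlock il cl 5 2 _ _ _ (by omega)]
          rw [show (pvCopyRanges.take 8).length = 8 from rfl]
          norm_num
          rw [pvSkipBlock il cl 9 3 _ _ _ (by omega)]
          rw [show (pvCopyRanges.take 8).length = 8 from rfl]
          norm_num
          exact pvSkipBlockNil il cl 17 4 _ _ (by omega)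
        simp only [find_icc_code_py, find_icc_code_py_alt, hA, hgi, hci, pvCopyScanEq16]
        rw [hcntval, if_neg hcnt]
  by_cases h3 : (3:Int) ≤ il ∧ il ≤ 4
  ·
    have hgi : pvFindRange il pvInsertRanges 0 = some 3 := by
      simp only [pvInsertRanges, pvFindRange]
      split_ifs <;> first | rfl | (exfalso; omega)
    have hcntval : pvGroupCopyCount.getD 3 0 = 8 := rfl
    have hoffval : pvGroupOffset.getD 3 0 = 32 := rfl
    rcases hci : pvFindRange cl pvCopyRanges 0 with _ | c
    · have hp : pvFindRange cl (pvCopyRanges.take 8) 32 = none := by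
        rw [pvFindRange_take, hci]
      have hA : pvIccScan il cl pvIccTable 0 = none := by
        rw [pvTableDecomp]
        rw [pvSkipBlock il cl 0 0 _ _ _ (by omega)]
        rw [show (pvCopyRanges.take 16).length = 16 from rfl]
        norm_num
        rw [pvSkipBlock il cl 1 0 _ _ _ (by omega)]
        rw [show (pvCopyRanges.take 8).length = 8 from rfl]
        norm_num
        rw [pvSkipBlock il cl 2 0 _ _ _ (by omega)]
        rw [show (pvCopyRanges.take 8).length = 8 from rfl]
        norm_num
        rw [pvNotFoundBlock il cl 3 1 _ _ _ hp]
        rw [show (pvCopyRanges.take 8).length = 8 from rfl]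
        norm_num
        rw [pvSkipBlock il cl 5 2 _ _ _ (by omega)]
        rw [show (pvCopyRanges.take 8).length = 8 from rfl]
        norm_num
        rw [pvSkipBlock il cl 9 3 _ _ _ (by omega)]
        rw [show (pvCopyRanges.take 8).length = 8 from rfl]
        norm_num
        exact pvSkipBlockNil il cl 17 4 _ _ (by omega)
      simp only [find_icc_code_py, find_icc_code_py_alt, hA, hci, pvCopyScanEq16]
    · by_cases hcnt : c < 8
      · have hp : pvFindRange cl (pvCopyRanges.take 8) 32 = some (32 + c) := by
          simp [pvFindRange_take, hci, hcnt]
        have hA : pvIccScan il cl pvIccTable 0 = some (32 + c) := by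
          rw [pvTableDecomp]
          rw [pvSkipBlock il cl 0 0 _ _ _ (by omega)]
          rw [show (pvCopyRanges.take 16).length = 16 from rfl]
          norm_num
          rw [pvSkipBlock il cl 1 0 _ _ _ (by omega)]
          rw [show (pvCopyRanges.take 8).length = 8 from rfl]
          norm_num
          rw [pvSkipBlock il cl 2 0 _ _ _ (by omega)]
          rw [show (pvCopyRanges.take 8).length = 8 from rfl]
          norm_num
          exact pvFoundBlock il cl 3 1 _ _ _ (32 + c) (by omega) hp
        simp only [find_icc_code_py, find_icc_code_py_alt, hA, hgi, hci]
        rw [hcntval, hoffval, if_pos hcnt]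
        push_cast
        omega
      · have hp : pvFindRange cl (pvCopyRanges.take 8) 32 = none := by
          simp [pvFindRange_take, hci, hcnt]
        have hA : pvIccScan il cl pvIccTable 0 = none := by
          rw [pvTableDecomp]
          rw [pvSkipBlock il cl 0 0 _ _ _ (by omega)]
          rw [show (pvCopyRanges.take 16).length = 16 from rfl]
          norm_num
          rw [pvSkipBlock il cl 1 0 _ _ _ (by omega)]
          rw [show (pvCopyRanges.take 8).length = 8 from rfl]
          norm_num
          rw [pvSkipBlock il cl 2 0 _ _ _ (by omega)]
          rw [show (pvCopyRanges.take 8).length = 8 from rfl]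
          norm_num
          rw [pvNotFoundBlock il cl 3 1 _ _ _ hp]
          rw [show (pvCopyRanges.take 8).length = 8 from rfl]
          norm_num
          rw [pvSkipBlock il cl 5 2 _ _ _ (by omega)]
          rw [show (pvCopyRanges.take 8).length = 8 from rfl]
          norm_num
          rw [pvSkipBlock il cl 9 3 _ _ _ (by omega)]
          rw [show (pvCopyRanges.take 8).length = 8 from rfl]
          norm_num
          exact pvSkipBlockNil il cl 17 4 _ _ (by omega)
        simp only [find_icc_code_py, find_icc_code_py_alt, hA, hgi, hci, pvCopyScanEq16]
        rw [hcntval, if_neg hcnt]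
  by_cases h4 : (5:Int) ≤ il ∧ il ≤ 8
  ·
    have hgi : pvFindRange il pvInsertRanges 0 = some 4 := by
      simp only [pvInsertRanges, pvFindRange]
      split_ifs <;> first | rfl | (exfalso; omega)
    have hcntval : pvGroupCopyCount.getD 4 0 = 8 := rfl
    have hoffval : pvGroupOffset.getD 4 0 = 40 := rfl
    rcases hci : pvFindRange cl pvCopyRanges 0 with _ | c
    · have hp : pvFindRange cl (pvCopyRanges.take 8) 40 = none := by
        rw [pvFindRange_take, hci]
      have hA : pvIccScan il cl pvIccTable 0 = none := by
        rw [pvTableDecomp]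
        rw [pvSkipBlock il cl 0 0 _ _ _ (by omega)]
        rw [show (pvCopyRanges.take 16).length = 16 from rfl]
        norm_num
        rw [pvSkipBlock il cl 1 0 _ _ _ (by omega)]
        rw [show (pvCopyRanges.take 8).length = 8 from rfl]
        norm_num
        rw [pvSkipBlock il cl 2 0 _ _ _ (by omega)]
        rw [show (pvCopyRanges.take 8).length = 8 from rfl]
        norm_num
        rw [pvSkipBlock il cl 3 1 _ _ _ (by omega)]
        rw [show (pvCopyRanges.take 8).length = 8 from rfl]
        norm_num
        rw [pvNotFoundBlock il cl 5 2 _ _ _ hp]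
        rw [show (pvCopyRanges.take 8).length = 8 from rfl]
        norm_num
        rw [pvSkipBlock il cl 9 3 _ _ _ (by omega)]
        rw [show (pvCopyRanges.take 8).length = 8 from rfl]
        norm_num
        exact pvSkipBlockNil il cl 17 4 _ _ (by omega)
      simp only [find_icc_code_py, find_icc_code_py_alt, hA, hci, pvCopyScanEq16]
    · by_cases hcnt : c < 8
      · have hp : pvFindRange cl (pvCopyRanges.take 8) 40 = some (40 + c) := by
          simp [pvFindRange_take, hci, hcnt]
        have hA : pvIccScan il cl pvIccTable 0 = some (40 + c) := by
          rw [pvTableDecomp]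
          rw [pvSkipBlock il cl 0 0 _ _ _ (by omega)]
          rw [show (pvCopyRanges.take 16).length = 16 from rfl]
          norm_num
          rw [pvSkipBlock il cl 1 0 _ _ _ (by omega)]
          rw [show (pvCopyRanges.take 8).length = 8 from rfl]
          norm_num
          rw [pvSkipBlock il cl 2 0 _ _ _ (by omega)]
          rw [show (pvCopyRanges.take 8).length = 8 from rfl]
          norm_num
          rw [pvSkipBlock il cl 3 1 _ _ _ (by omega)]
          rw [show (pvCopyRanges.take 8).length = 8 from rfl]
          norm_num
          exact pvFoundBlock il cl 5 2 _ _ _ (40 + c) (by omega) hp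
        simp only [find_icc_code_py, find_icc_code_py_alt, hA, hgi, hci]
        rw [hcntval, hoffval, if_pos hcnt]
        push_cast
        omega
      · have hp : pvFindRange cl (pvCopyRanges.take 8) 40 = none := by
          simp [pvFindRange_take, hci, hcnt]
        have hA : pvIccScan il cl pvIccTable 0 = none := by
          rw [pvTableDecomp]
          rw [pvSkipBlock il cl 0 0 _ _ _ (by omega)]
          rw [show (pvCopyRanges.take 16).length = 16 from rfl]
          norm_num
          rw [pvSkipBlock il cl 1 0 _ _ _ (by omega)]
          rw [show (pvCopyRanges.take 8).length = 8 from rfl]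
          norm_num
          rw [pvSkipBlock il cl 2 0 _ _ _ (by omega)]
          rw [show (pvCopyRanges.take 8).length = 8 from rfl]
          norm_num
          rw [pvSkipBlock il cl 3 1 _ _ _ (by omega)]
          rw [show (pvCopyRanges.take 8).length = 8 from rfl]
          norm_num
          rw [pvNotFoundBlock il cl 5 2 _ _ _ hp]
          rw [show (pvCopyRanges.take 8).length = 8 from rfl]
          norm_num
          rw [pvSkipBlock il cl 9 3 _ _ _ (by omega)]
          rw [show (pvCopyRanges.take 8).length = 8 from rfl]
          norm_num
          exact pvSkipBlockNil il cl 17 4 _ _ (by omega)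
        simp only [find_icc_code_py, find_icc_code_py_alt, hA, hgi, hci, pvCopyScanEq16]
        rw [hcntval, if_neg hcnt]
  by_cases h5 : (9:Int) ≤ il ∧ il ≤ 16
  ·
    have hgi : pvFindRange il pvInsertRanges 0 = some 5 := by
      simp only [pvInsertRanges, pvFindRange]
      split_ifs <;> first | rfl | (exfalso; omega)
    have hcntval : pvGroupCopyCount.getD 5 0 = 8 := rfl
    have hoffval : pvGroupOffset.getD 5 0 = 48 := rfl
    rcases hci : pvFindRange cl pvCopyRanges 0 with _ | c
    · have hp : pvFindRange cl (pvCopyRanges.take 8) 48 = none := by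
        rw [pvFindRange_take, hci]
      have hA : pvIccScan il cl pvIccTable 0 = none := by
        rw [pvTableDecomp]
        rw [pvSkipBlock il cl 0 0 _ _ _ (by omega)]
        rw [show (pvCopyRanges.take 16).length = 16 from rfl]
        norm_num
        rw [pvSkipBlock il cl 1 0 _ _ _ (by omega)]
        rw [show (pvCopyRanges.take 8).length = 8 from rfl]
        norm_num
        rw [pvSkipBlock il cl 2 0 _ _ _ (by omega)]
        rw [show (pvCopyRanges.take 8).length = 8 from rfl]
        norm_num
        rw [pvSkipBlock il cl 3 1 _ _ _ (by omega)]
        rw [show (pvCopyRanges.take 8).length = 8 from rfl]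
        norm_num
        rw [pvSkipBlock il cl 5 2 _ _ _ (by omega)]
        rw [show (pvCopyRanges.take 8).length = 8 from rfl]
        norm_num
        rw [pvNotFoundBlock il cl 9 3 _ _ _ hp]
        rw [show (pvCopyRanges.take 8).length = 8 from rfl]
        norm_num
        exact pvSkipBlockNil il cl 17 4 _ _ (by omega)
      simp only [find_icc_code_py, find_icc_code_py_alt, hA, hci, pvCopyScanEq16]
    · by_cases hcnt : c < 8
      · have hp : pvFindRange cl (pvCopyRanges.take 8) 48 = some (48 + c) := by
          simp [pvFindRange_take, hci, hcnt]
        have hA : pvIccScan il cl pvIccTable 0 = some (48 + c) := by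
          rw [pvTableDecomp]
          rw [pvSkipBlock il cl 0 0 _ _ _ (by omega)]
          rw [show (pvCopyRanges.take 16).length = 16 from rfl]
          norm_num
          rw [pvSkipBlock il cl 1 0 _ _ _ (by omega)]
          rw [show (pvCopyRanges.take 8).length = 8 from rfl]
          norm_num
          rw [pvSkipBlock il cl 2 0 _ _ _ (by omega)]
          rw [show (pvCopyRanges.take 8).length = 8 from rfl]
          norm_num
          rw [pvSkipBlock il cl 3 1 _ _ _ (by omega)]
          rw [show (pvCopyRanges.take 8).length = 8 from rfl]
          norm_num
          rw [pvSkipBlock il cl 5 2 _ _ _ (by omega)]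
          rw [show (pvCopyRanges.take 8).length = 8 from rfl]
          norm_num
          exact pvFoundBlock il cl 9 3 _ _ _ (48 + c) (by omega) hp
        simp only [find_icc_code_py, find_icc_code_py_alt, hA, hgi, hci]
        rw [hcntval, hoffval, if_pos hcnt]
        push_cast
        omega
      · have hp : pvFindRange cl (pvCopyRanges.take 8) 48 = none := by
          simp [pvFindRange_take, hci, hcnt]
        have hA : pvIccScan il cl pvIccTable 0 = none := by
          rw [pvTableDecomp]
          rw [pvSkipBlock il cl 0 0 _ _ _ (by omega)]
          rw [show (pvCopyRanges.take 16).length = 16 from rfl]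
          norm_num
          rw [pvSkipBlock il cl 1 0 _ _ _ (by omega)]
          rw [show (pvCopyRanges.take 8).length = 8 from rfl]
          norm_num
          rw [pvSkipBlock il cl 2 0 _ _ _ (by omega)]
          rw [show (pvCopyRanges.take 8).length = 8 from rfl]
          norm_num
          rw [pvSkipBlock il cl 3 1 _ _ _ (by omega)]
          rw [show (pvCopyRanges.take 8).length = 8 from rfl]
          norm_num
          rw [pvSkipBlock il cl 5 2 _ _ _ (by omega)]
          rw [show (pvCopyRanges.take 8).length = 8 from rfl]
          norm_num
          rw [pvNotFoundBlock il cl 9 3 _ _ _ hp]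
          rw [show (pvCopyRanges.take 8).length = 8 from rfl]
          norm_num
          exact pvSkipBlockNil il cl 17 4 _ _ (by omega)
        simp only [find_icc_code_py, find_icc_code_py_alt, hA, hgi, hci, pvCopyScanEq16]
        rw [hcntval, if_neg hcnt]
  by_cases h6 : (17:Int) ≤ il ∧ il ≤ 32
  ·
    have hgi : pvFindRange il pvInsertRanges 0 = some 6 := by
      simp only [pvInsertRanges, pvFindRange]
      split_ifs <;> first | rfl | (exfalso; omega)
    have hcntval : pvGroupCopyCount.getD 6 0 = 7 := rfl
    have hoffval : pvGroupOffset.getD 6 0 = 56 := rfl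
    rcases hci : pvFindRange cl pvCopyRanges 0 with _ | c
    · have hp : pvFindRange cl (pvCopyRanges.take 7) 56 = none := by
        rw [pvFindRange_take, hci]
      have hA : pvIccScan il cl pvIccTable 0 = none := by
        rw [pvTableDecomp]
        rw [pvSkipBlock il cl 0 0 _ _ _ (by omega)]
        rw [show (pvCopyRanges.take 16).length = 16 from rfl]
        norm_num
        rw [pvSkipBlock il cl 1 0 _ _ _ (by omega)]
        rw [show (pvCopyRanges.take 8).length = 8 from rfl]
        norm_num
        rw [pvSkipBlock il cl 2 0 _ _ _ (by omega)]
        rw [show (pvCopyRanges.take 8).length = 8 from rfl]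
        norm_num
        rw [pvSkipBlock il cl 3 1 _ _ _ (by omega)]
        rw [show (pvCopyRanges.take 8).length = 8 from rfl]
        norm_num
        rw [pvSkipBlock il cl 5 2 _ _ _ (by omega)]
        rw [show (pvCopyRanges.take 8).length = 8 from rfl]
        norm_num
        rw [pvSkipBlock il cl 9 3 _ _ _ (by omega)]
        rw [show (pvCopyRanges.take 8).length = 8 from rfl]
        norm_num
        exact pvNotFoundBlockNil il cl 17 4 _ _ hp
      simp only [find_icc_code_py, find_icc_code_py_alt, hA, hci, pvCopyScanEq16]
    · by_cases hcnt : c < 7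
      · have hp : pvFindRange cl (pvCopyRanges.take 7) 56 = some (56 + c) := by
          simp [pvFindRange_take, hci, hcnt]
        have hA : pvIccScan il cl pvIccTable 0 = some (56 + c) := by
          rw [pvTableDecomp]
          rw [pvSkipBlock il cl 0 0 _ _ _ (by omega)]
          rw [show (pvCopyRanges.take 16).length = 16 from rfl]
          norm_num
          rw [pvSkipBlock il cl 1 0 _ _ _ (by omega)]
          rw [show (pvCopyRanges.take 8).length = 8 from rfl]
          norm_num
          rw [pvSkipBlock il cl 2 0 _ _ _ (by omega)]
          rw [show (pvCopyRanges.take 8).length = 8 from rfl]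
          norm_num
          rw [pvSkipBlock il cl 3 1 _ _ _ (by omega)]
          rw [show (pvCopyRanges.take 8).length = 8 from rfl]
          norm_num
          rw [pvSkipBlock il cl 5 2 _ _ _ (by omega)]
          rw [show (pvCopyRanges.take 8).length = 8 from rfl]
          norm_num
          rw [pvSkipBlock il cl 9 3 _ _ _ (by omega)]
          rw [show (pvCopyRanges.take 8).length = 8 from rfl]
          norm_num
          exact pvFoundBlock il cl 17 4 _ _ _ (56 + c) (by omega) hp
        simp only [find_icc_code_py, find_icc_code_py_alt, hA, hgi, hci]
        rw [hcntval, hoffval, if_pos hcnt]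
        push_cast
        omega
      · have hp : pvFindRange cl (pvCopyRanges.take 7) 56 = none := by
          simp [pvFindRange_take, hci, hcnt]
        have hA : pvIccScan il cl pvIccTable 0 = none := by
          rw [pvTableDecomp]
          rw [pvSkipBlock il cl 0 0 _ _ _ (by omega)]
          rw [show (pvCopyRanges.take 16).length = 16 from rfl]
          norm_num
          rw [pvSkipBlock il cl 1 0 _ _ _ (by omega)]
          rw [show (pvCopyRanges.take 8).length = 8 from rfl]
          norm_num
          rw [pvSkipBlock il cl 2 0 _ _ _ (by omega)]
          rw [show (pvCopyRanges.take 8).length = 8 from rfl]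
          norm_num
          rw [pvSkipBlock il cl 3 1 _ _ _ (by omega)]
          rw [show (pvCopyRanges.take 8).length = 8 from rfl]
          norm_num
          rw [pvSkipBlock il cl 5 2 _ _ _ (by omega)]
          rw [show (pvCopyRanges.take 8).length = 8 from rfl]
          norm_num
          rw [pvSkipBlock il cl 9 3 _ _ _ (by omega)]
          rw [show (pvCopyRanges.take 8).length = 8 from rfl]
          norm_num
          exact pvNotFoundBlockNil il cl 17 4 _ _ hp
        simp only [find_icc_code_py, find_icc_code_py_alt, hA, hgi, hci, pvCopyScanEq16]
        rw [hcntval, if_neg hcnt]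
  have hgi : pvFindRange il pvInsertRanges 0 = none := by
    simp only [pvInsertRanges, pvFindRange]
    split_ifs <;> first | rfl | (exfalso; omega)
  have hA : pvIccScan il cl pvIccTable 0 = none := by
    rw [pvTableDecomp]
    rw [pvSkipBlock il cl 0 0 _ _ _ (by omega)]
    rw [show (pvCopyRanges.take 16).length = 16 from rfl]
    norm_num
    rw [pvSkipBlock il cl 1 0 _ _ _ (by omega)]
    rw [show (pvCopyRanges.take 8).length = 8 from rfl]
    norm_num
    rw [pvSkipBlock il cl 2 0 _ _ _ (by omega)]
    rw [show (pvCopyRanges.take 8).length = 8 from rfl]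
    norm_num
    rw [pvSkipBlock il cl 3 1 _ _ _ (by omega)]
    rw [show (pvCopyRanges.take 8).length = 8 from rfl]
    norm_num
    rw [pvSkipBlock il cl 5 2 _ _ _ (by omega)]
    rw [show (pvCopyRanges.take 8).length = 8 from rfl]
    norm_num
    rw [pvSkipBlock il cl 9 3 _ _ _ (by omega)]
    rw [show (pvCopyRanges.take 8).length = 8 from rfl]
    norm_num
    exact pvSkipBlockNil il cl 17 4 _ _ (by omega)
  rcases hci : pvFindRange cl pvCopyRanges 0 with _ | c
  · simp only [find_icc_code_py, find_icc_code_py_alt, hA, hci, pvCopyScanEq16]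
  · simp only [find_icc_code_py, find_icc_code_py_alt, hA, hgi, hci, pvCopyScanEq16]

-- ===== VERDICT (by name: the statement is the Claim_ definition above) =====
theorem find_icc_code_py_spec : Claim_equal_find_icc_code_py := by
  intro il cl _
  unfold Spec_find_icc_code_py
  exact pv_main il cl
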